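-- pv_equiv track=rewrite | github.com/eneagoe/codeforces | contest/1851/1851_B.py | can_sort
-- ===== SOURCE A (Python) =====
-- def can_sort(array):
--     odds, odds_positions = [], []
--     evens, evens_positions = [], []
--
--     for i, x in enumerate(array):
--         if x % 2 == 0:
--             evens.append(x)
--             evens_positions.append(i)
--         else:
--             odds.append(x)
--             odds_positions.append(i)
--
--     odds.sort()
--     odds_positions.sort()
--     evens.sort()
--     evens_positions.sort()
--
--     n = len(odds)
--     m = len(evens)
--
--     i, j = 0, 0
--
--     while i < n and j < m:
--         if odds[i] < evens[j]:
--             if odds_positions[i] > evens_positions[j]: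
--                 return False
--             i += 1
--         else:
--             if evens_positions[j] > odds_positions[i]:
--                 return False
--             j += 1
--
--     return True
-- ===== SOURCE B (Python) =====
-- def can_sort(array):
--     # Build the best achievable arrangement: sorted odds placed at the odd
--     # slots, sorted evens at the even slots, then check it is globally sorted.
--     odd_vals = sorted(x for x in array if x % 2)
--     even_vals = sorted(x for x in array if x % 2 == 0)
--     it_o, it_e = iter(odd_vals), iter(even_vals)
--     rebuilt = [next(it_o) if x % 2 else next(it_e) for x in array]
--     return rebuilt == sorted(array)
-- ===== Notes on version B (the rewrite author's own statement) =====
-- stated objective: alternative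
-- what changed: B rebuilds the best achievable arrangement (sorted odds placed back at the odd-element slots, sorted evens at the even slots) and returns whether that rebuilt list equals sorted(array), instead of A's two-pointer merge walk comparing values and original positions.
import Mathlib
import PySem

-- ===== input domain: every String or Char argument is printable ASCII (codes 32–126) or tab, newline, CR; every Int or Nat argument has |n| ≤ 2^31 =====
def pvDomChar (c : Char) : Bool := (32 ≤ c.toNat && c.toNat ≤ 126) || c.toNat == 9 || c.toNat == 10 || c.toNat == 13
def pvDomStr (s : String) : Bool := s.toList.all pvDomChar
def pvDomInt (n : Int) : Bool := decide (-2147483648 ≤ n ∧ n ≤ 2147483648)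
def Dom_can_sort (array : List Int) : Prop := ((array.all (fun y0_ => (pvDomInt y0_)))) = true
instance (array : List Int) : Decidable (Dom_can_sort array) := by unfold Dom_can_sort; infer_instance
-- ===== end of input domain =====

-- B rebuilds the best achievable arrangement (sorted odds at the odd slots, sorted
-- evens at the even slots) and compares it with sorted(array); A does a two-pointer
-- merge walk over values and original positions.  Objective: alternative algorithm.

-- ===== PORT A =====
-- the while loop of A, as structural recursion over the four suffixes (i, j cursors)
def canSortLoop : List Int → List Int → List Int → List Int → Bool
  | o :: os, po :: pos, e :: es, pe :: pes =>
    if o < e then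
      if po > pe then false else canSortLoop os pos (e :: es) (pe :: pes)
    else
      if pe > po then false else canSortLoop (o :: os) (po :: pos) es pes
  | _, _, _, _ => true
termination_by os _ es _ => os.length + es.length

def can_sort (array : List Int) : Bool :=
  let st := (PySem.List.enumerate array 0).foldl
    (fun (st : List Int × List Int × List Int × List Int) p =>
      if PySem.Int.mod p.2 2 == 0 then
        (st.1, st.2.1, st.2.2.1 ++ [p.2], st.2.2.2 ++ [p.1])
      else
        (st.1 ++ [p.2], st.2.1 ++ [p.1], st.2.2.1, st.2.2.2))
    ([], [], [], [])
  let odds := PySem.List.sorted st.1 (fun x => x) false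
  let odds_positions := PySem.List.sorted st.2.1 (fun x => x) false
  let evens := PySem.List.sorted st.2.2.1 (fun x => x) false
  let evens_positions := PySem.List.sorted st.2.2.2 (fun x => x) false
  canSortLoop odds odds_positions evens evens_positions

-- ===== PORT B =====
-- the list comprehension with the two iterators: consume the next odd / even value
-- per element of array (the iterators never run dry: counts match, so headD 0 is exact)
def rebuild : List Int → List Int → List Int → List Int
  | [], _, _ => []
  | x :: xs, os, es =>
    if PySem.Int.mod x 2 != 0 then os.headD 0 :: rebuild xs os.tail es
    else es.headD 0 :: rebuild xs os es.tail

def can_sort_alt (array : List Int) : Bool :=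
  let odd_vals := PySem.List.sorted (array.filter (fun x => PySem.Int.mod x 2 != 0)) (fun x => x) false
  let even_vals := PySem.List.sorted (array.filter (fun x => PySem.Int.mod x 2 == 0)) (fun x => x) false
  rebuild array odd_vals even_vals == PySem.List.sorted array (fun x => x) false

-- ===== PRECONDITION & SPEC =====
def Spec_can_sort (array : List Int) (out : Bool) : Prop := out = can_sort_alt array
instance (array : List Int) (out : Bool) : Decidable (Spec_can_sort array out) := by unfold Spec_can_sort; infer_instance

-- ===== CLAIM (what is proved, stated in full; the proofs are below) =====
def Claim_equal_can_sort : Prop := ∀ (array : List Int), Dom_can_sort array → Spec_can_sort array (can_sort array)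

-- ===== LEMMAS AND PROOFS =====

-- positions (indices from k) of the odd / even elements of a list
def oddIdx : List Int → Int → List Int
  | [], _ => []
  | x :: xs, k => if PySem.Int.mod x 2 == 0 then oddIdx xs (k + 1) else k :: oddIdx xs (k + 1)

def evenIdx : List Int → Int → List Int
  | [], _ => []
  | x :: xs, k => if PySem.Int.mod x 2 == 0 then k :: evenIdx xs (k + 1) else evenIdx xs (k + 1)

-- merge two (value, position) lists by position
def mergePos : List (Int × Int) → List (Int × Int) → List (Int × Int)
  | [], l => l
  | a :: as, [] => a :: as
  | a :: as, b :: bs => if a.2 < b.2 then a :: mergePos as (b :: bs) else b :: mergePos (a :: as) bs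
termination_by l₁ l₂ => l₁.length + l₂.length

theorem mergePos_perm (l₁ l₂ : List (Int × Int)) : (mergePos l₁ l₂).Perm (l₁ ++ l₂) := by
  fun_induction mergePos l₁ l₂ with
  | case1 l => simp
  | case2 a as => simp
  | case3 a as b bs h ih => exact ih.cons a
  | case4 a as b bs h ih => exact (ih.cons b).trans List.perm_middle.symm

theorem mergePos_cons_right (Z₁ Z₂ : List (Int × Int)) (e k : Int)
    (h : ∀ p ∈ Z₁, k < p.2) :
    mergePos Z₁ ((e, k) :: Z₂) = (e, k) :: mergePos Z₁ Z₂ := by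
  cases Z₁ with
  | nil => simp [mergePos]
  | cons a as =>
      have := h a (List.mem_cons_self ..)
      simp only [mergePos]
      rw [if_neg (by omega)]

theorem mergePos_cons_left (Z₁ Z₂ : List (Int × Int)) (o k : Int)
    (h : ∀ p ∈ Z₂, k < p.2) :
    mergePos ((o, k) :: Z₁) Z₂ = (o, k) :: mergePos Z₁ Z₂ := by
  cases Z₂ with
  | nil => cases Z₁ <;> simp [mergePos]
  | cons b bs =>
      have := h b (List.mem_cons_self ..)
      simp only [mergePos]
      rw [if_pos (by omega)]

theorem mem_map_fst_mergePos (l₁ l₂ : List (Int × Int)) (a : Int) :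
    a ∈ (mergePos l₁ l₂).map Prod.fst ↔ a ∈ l₁.map Prod.fst ∨ a ∈ l₂.map Prod.fst := by
  rw [((mergePos_perm l₁ l₂).map Prod.fst).mem_iff]
  simp

theorem oddIdx_ge (xs : List Int) (k : Int) : ∀ m ∈ oddIdx xs k, k ≤ m := by
  induction xs generalizing k with
  | nil => simp [oddIdx]
  | cons x xs ih =>
      intro m hm
      simp only [oddIdx] at hm
      split at hm
      · have := ih (k + 1) m hm; omega
      · rcases List.mem_cons.1 hm with h | h
        · omega
        · have := ih (k + 1) m h; omega

theorem evenIdx_ge (xs : List Int) (k : Int) : ∀ m ∈ evenIdx xs k, k ≤ m := by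
  induction xs generalizing k with
  | nil => simp [evenIdx]
  | cons x xs ih =>
      intro m hm
      simp only [evenIdx] at hm
      split at hm
      · rcases List.mem_cons.1 hm with h | h
        · omega
        · have := ih (k + 1) m h; omega
      · have := ih (k + 1) m hm; omega

theorem oddIdx_pairwise (xs : List Int) (k : Int) : (oddIdx xs k).Pairwise (· < ·) := by
  induction xs generalizing k with
  | nil => simp [oddIdx]
  | cons x xs ih =>
      simp only [oddIdx]
      split
      · exact ih (k + 1)
      · exact List.Pairwise.cons (fun m hm => by have := oddIdx_ge xs (k + 1) m hm; omega) (ih (k + 1))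

theorem evenIdx_pairwise (xs : List Int) (k : Int) : (evenIdx xs k).Pairwise (· < ·) := by
  induction xs generalizing k with
  | nil => simp [evenIdx]
  | cons x xs ih =>
      simp only [evenIdx]
      split
      · exact List.Pairwise.cons (fun m hm => by have := evenIdx_ge xs (k + 1) m hm; omega) (ih (k + 1))
      · exact ih (k + 1)

theorem idx_disjoint (xs : List Int) (k : Int) :
    ∀ m, m ∈ oddIdx xs k → m ∈ evenIdx xs k → False := by
  induction xs generalizing k with
  | nil => simp [oddIdx]
  | cons x xs ih =>
      intro m ho he
      by_cases h : PySem.Int.mod x 2 == 0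
      · simp only [oddIdx, evenIdx, h, if_pos] at ho he
        rcases List.mem_cons.1 he with h2 | h2
        · subst h2; have := oddIdx_ge xs (m + 1) m ho; omega
        · exact ih (k + 1) m ho h2
      · simp only [oddIdx, evenIdx, h, Bool.false_eq_true] at ho he
        rcases List.mem_cons.1 ho with h2 | h2
        · subst h2; have := evenIdx_ge xs (m + 1) m he; omega
        · exact ih (k + 1) m h2 he

theorem length_oddIdx (xs : List Int) (k : Int) :
    (oddIdx xs k).length = (xs.filter (fun x => PySem.Int.mod x 2 != 0)).length := by
  induction xs generalizing k with
  | nil => simp [oddIdx]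
  | cons x xs ih =>
      by_cases h : (2 : Int) ∣ x
      · simp [oddIdx, h, ih]
      · have h2 : x % 2 = 1 := by omega
        simp [oddIdx, h, ih]

theorem length_evenIdx (xs : List Int) (k : Int) :
    (evenIdx xs k).length = (xs.filter (fun x => PySem.Int.mod x 2 == 0)).length := by
  induction xs generalizing k with
  | nil => simp [evenIdx]
  | cons x xs ih =>
      by_cases h : (2 : Int) ∣ x <;> simp [evenIdx, h, ih]

-- A's first loop computes the filters and the index lists
theorem foldA (xs : List Int) (s : Int) (a b c d : List Int) :
    (PySem.List.enumerate xs s).foldl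
      (fun (st : List Int × List Int × List Int × List Int) p =>
        if PySem.Int.mod p.2 2 == 0 then
          (st.1, st.2.1, st.2.2.1 ++ [p.2], st.2.2.2 ++ [p.1])
        else
          (st.1 ++ [p.2], st.2.1 ++ [p.1], st.2.2.1, st.2.2.2))
      (a, b, c, d)
    = (a ++ xs.filter (fun x => PySem.Int.mod x 2 != 0), b ++ oddIdx xs s,
       c ++ xs.filter (fun x => PySem.Int.mod x 2 == 0), d ++ evenIdx xs s) := by
  induction xs generalizing s a b c d with
  | nil => simp [PySem.List.enumerate_nil, oddIdx, evenIdx]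
  | cons x xs ih =>
      rw [PySem.List.enumerate_cons, List.foldl_cons]
      by_cases h : (2 : Int) ∣ x
      · have h2 : ¬ x % 2 = 1 := by omega
        have ih2 := ih (s + 1) a b (c ++ [x]) (d ++ [s])
        simp only [List.append_assoc, List.singleton_append] at ih2
        simpa [h, h2, oddIdx, evenIdx, List.filter_cons, List.append_assoc] using ih2
      · have h2 : x % 2 = 1 := by omega
        have ih2 := ih (s + 1) (a ++ [x]) (b ++ [s]) c d
        simp only [List.append_assoc, List.singleton_append] at ih2
        simpa [h, h2, oddIdx, evenIdx, List.filter_cons, List.append_assoc] using ih2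

-- rebuild equals the by-position merge of the two (value, index) zips
theorem rebuild_eq_mergePos (xs : List Int) (k : Int) (os es : List Int)
    (ho : os.length = (oddIdx xs k).length) (he : es.length = (evenIdx xs k).length) :
    rebuild xs os es = (mergePos (os.zip (oddIdx xs k)) (es.zip (evenIdx xs k))).map Prod.fst := by
  induction xs generalizing k os es with
  | nil => simp [rebuild, oddIdx, evenIdx, mergePos]
  | cons x xs ih =>
      by_cases h : (2 : Int) ∣ x
      · -- even head: the rebuilt list takes the next even value, which sits at index k
        have hodd : oddIdx (x :: xs) k = oddIdx xs (k + 1) := by simp [oddIdx, h]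
        have heven : evenIdx (x :: xs) k = k :: evenIdx xs (k + 1) := by simp [evenIdx, h]
        rw [hodd] at ho; rw [heven] at he
        cases es with
        | nil => simp at he
        | cons e es' =>
            have h2 : ¬ x % 2 = 1 := by omega
            rw [hodd, heven, List.zip_cons_cons,
                mergePos_cons_right _ _ e k (fun p hp => by
                  have := oddIdx_ge xs (k + 1) p.2 (List.of_mem_zip hp).2; omega)]
            simp only [List.map_cons]
            rw [show rebuild (x :: xs) os (e :: es') = e :: rebuild xs os es' from by
              simp [rebuild, h2]]
            simp only [List.cons.injEq, true_and]
            exact ih (k + 1) os es' ho (by simpa using he)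
      · -- odd head: the rebuilt list takes the next odd value, which sits at index k
        have hodd : oddIdx (x :: xs) k = k :: oddIdx xs (k + 1) := by simp [oddIdx, h]
        have heven : evenIdx (x :: xs) k = evenIdx xs (k + 1) := by simp [evenIdx, h]
        rw [hodd] at ho; rw [heven] at he
        cases os with
        | nil => simp at ho
        | cons o os' =>
            have h2 : x % 2 = 1 := by omega
            rw [hodd, heven, List.zip_cons_cons,
                mergePos_cons_left _ _ o k (fun p hp => by
                  have := evenIdx_ge xs (k + 1) p.2 (List.of_mem_zip hp).2; omega)]
            simp only [List.map_cons]
            rw [show rebuild (x :: xs) (o :: os') es = o :: rebuild xs os' es from by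
              simp [rebuild, h2]]
            simp only [List.cons.injEq, true_and]
            exact ih (k + 1) os' es (by simpa using ho) he

-- the main correspondence: A's walk succeeds iff the by-position merge is nondecreasing
theorem loop_iff_pairwise (n : Nat) :
    ∀ (O Po E Pe : List Int), O.length + E.length ≤ n →
    O.Pairwise (· ≤ ·) → E.Pairwise (· ≤ ·) →
    Po.Pairwise (· < ·) → Pe.Pairwise (· < ·) →
    (∀ p ∈ Po, ∀ q ∈ Pe, p ≠ q) →
    (∀ a ∈ O, ∀ b ∈ E, a ≠ b) →
    O.length = Po.length → E.length = Pe.length →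
    (canSortLoop O Po E Pe = true ↔
      ((mergePos (O.zip Po) (E.zip Pe)).map Prod.fst).Pairwise (· ≤ ·)) := by
  induction n with
  | zero =>
      intro O Po E Pe hlen _ _ _ _ _ _ hlO hlE
      have hO : O = [] := List.length_eq_zero_iff.1 (by omega)
      have hE : E = [] := List.length_eq_zero_iff.1 (by omega)
      subst hO; subst hE
      have h1 : Po = [] := List.length_eq_zero_iff.1 (by simpa using hlO.symm)
      have h2 : Pe = [] := List.length_eq_zero_iff.1 (by simpa using hlE.symm)
      subst h1; subst h2
      simp [canSortLoop, mergePos]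
  | succ n ih =>
      intro O Po E Pe hlen hO hE hPo hPe hdisj hval hlO hlE
      cases O with
      | nil =>
          have h1 : Po = [] := List.length_eq_zero_iff.1 (by simpa using hlO.symm)
          subst h1
          simp [canSortLoop, mergePos, List.map_fst_zip hlE.le, hE]
      | cons o os =>
        cases Po with
        | nil => simp at hlO
        | cons po pos =>
        cases E with
        | nil =>
            have h2 : Pe = [] := List.length_eq_zero_iff.1 (by simpa using hlE.symm)
            subst h2
            refine iff_of_true (by simp [canSortLoop]) ?_
            rw [show mergePos ((o :: os).zip (po :: pos)) (([] : List Int).zip []) =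
                  (o :: os).zip (po :: pos) from by simp [List.zip_cons_cons, mergePos]]
            rw [List.map_fst_zip hlO.le]
            exact hO
        | cons e es =>
        cases Pe with
        | nil => simp at hlE
        | cons pe pes =>
        have hone : o ≠ e := hval o (List.mem_cons_self ..) e (List.mem_cons_self ..)
        have hpone : po ≠ pe := hdisj po (List.mem_cons_self ..) pe (List.mem_cons_self ..)
        simp only [List.zip_cons_cons]
        by_cases hoe : o < e
        · by_cases hpp : po > pe
          · rw [show mergePos ((o, po) :: os.zip pos) ((e, pe) :: es.zip pes)
                  = (e, pe) :: mergePos ((o, po) :: os.zip pos) (es.zip pes) from by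
                simp [mergePos, show ¬ po < pe by omega]]
            refine iff_of_false (by simp [canSortLoop, hoe, hpp]) (fun hpair => ?_)
            simp only [List.map_cons] at hpair
            have hmem : o ∈ (mergePos ((o, po) :: os.zip pos) (es.zip pes)).map Prod.fst := by
              rw [mem_map_fst_mergePos]; left; simp
            have := (List.pairwise_cons.1 hpair).1 o hmem
            omega
          · have hpp2 : po < pe := by omega
            rw [show canSortLoop (o :: os) (po :: pos) (e :: es) (pe :: pes)
                  = canSortLoop os pos (e :: es) (pe :: pes) from by simp [canSortLoop, hoe, hpp]]
            rw [show mergePos ((o, po) :: os.zip pos) ((e, pe) :: es.zip pes)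
                  = (o, po) :: mergePos (os.zip pos) ((e, pe) :: es.zip pes) from by
                simp [mergePos, hpp2]]
            simp only [List.map_cons]
            rw [List.pairwise_cons]
            have hhead : ∀ y ∈ (mergePos (os.zip pos) ((e, pe) :: es.zip pes)).map Prod.fst, o ≤ y := by
              intro y hy
              rw [mem_map_fst_mergePos] at hy
              rcases hy with hy | hy
              · obtain ⟨p, hp, rfl⟩ := List.mem_map.1 hy
                exact (List.pairwise_cons.1 hO).1 p.1 (List.of_mem_zip hp).1
              · simp only [List.map_cons, List.mem_cons] at hy
                rcases hy with rfl | hy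
                · omega
                · obtain ⟨p, hp, rfl⟩ := List.mem_map.1 hy
                  have := (List.pairwise_cons.1 hE).1 p.1 (List.of_mem_zip hp).1
                  omega
            rw [ih os pos (e :: es) (pe :: pes) (by simp at hlen ⊢; omega)
                  hO.of_cons hE hPo.of_cons hPe
                  (fun p hp q hq => hdisj p (List.mem_cons_of_mem _ hp) q hq)
                  (fun a ha b hb => hval a (List.mem_cons_of_mem _ ha) b hb)
                  (by simpa using hlO) hlE]
            exact ⟨fun h => ⟨hhead, h⟩, fun h => h.2⟩
        · have hoe2 : e < o := by omega
          by_cases hpp : pe > po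
          · rw [show mergePos ((o, po) :: os.zip pos) ((e, pe) :: es.zip pes)
                  = (o, po) :: mergePos (os.zip pos) ((e, pe) :: es.zip pes) from by
                simp [mergePos, show po < pe by omega]]
            refine iff_of_false (by simp [canSortLoop, hoe, hpp]) (fun hpair => ?_)
            simp only [List.map_cons] at hpair
            have hmem : e ∈ (mergePos (os.zip pos) ((e, pe) :: es.zip pes)).map Prod.fst := by
              rw [mem_map_fst_mergePos]; right; simp
            have := (List.pairwise_cons.1 hpair).1 e hmem
            omega
          · have hpp2 : pe < po := by omega
            rw [show canSortLoop (o :: os) (po :: pos) (e :: es) (pe :: pes)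
                  = canSortLoop (o :: os) (po :: pos) es pes from by simp [canSortLoop, hoe, hpp]]
            rw [show mergePos ((o, po) :: os.zip pos) ((e, pe) :: es.zip pes)
                  = (e, pe) :: mergePos ((o, po) :: os.zip pos) (es.zip pes) from by
                simp [mergePos, show ¬ po < pe by omega]]
            simp only [List.map_cons]
            rw [List.pairwise_cons]
            have hhead : ∀ y ∈ (mergePos ((o, po) :: os.zip pos) (es.zip pes)).map Prod.fst, e ≤ y := by
              intro y hy
              rw [mem_map_fst_mergePos] at hy
              rcases hy with hy | hy
              · simp only [List.map_cons, List.mem_cons] at hy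
                rcases hy with rfl | hy
                · omega
                · obtain ⟨p, hp, rfl⟩ := List.mem_map.1 hy
                  have := (List.pairwise_cons.1 hO).1 p.1 (List.of_mem_zip hp).1
                  omega
              · obtain ⟨p, hp, rfl⟩ := List.mem_map.1 hy
                exact (List.pairwise_cons.1 hE).1 p.1 (List.of_mem_zip hp).1
            rw [ih (o :: os) (po :: pos) es pes (by simp at hlen ⊢; omega)
                  hO hE.of_cons hPo hPe.of_cons
                  (fun p hp q hq => hdisj p hp q (List.mem_cons_of_mem _ hq))
                  (fun a ha b hb => hval a ha b (List.mem_cons_of_mem _ hb))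
                  hlO (by simpa using hlE)]
            exact ⟨fun h => ⟨hhead, h⟩, fun h => h.2⟩

-- ===== VERDICT (by name: the statement is the Claim_ definition above) =====
theorem can_sort_spec : Claim_equal_can_sort := by
  intro array _
  unfold Spec_can_sort
  -- abbreviations
  have hsPo : PySem.List.sorted (oddIdx array 0) (fun x => x) false = oddIdx array 0 :=
    PySem.List.sorted_eq_self_of_pairwise _ _ ((oddIdx_pairwise array 0).imp (fun h => le_of_lt h))
  have hsPe : PySem.List.sorted (evenIdx array 0) (fun x => x) false = evenIdx array 0 :=
    PySem.List.sorted_eq_self_of_pairwise _ _ ((evenIdx_pairwise array 0).imp (fun h => le_of_lt h))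
  have hA : can_sort array =
      canSortLoop (PySem.List.sorted (array.filter (fun x => PySem.Int.mod x 2 != 0)) (fun x => x) false)
        (oddIdx array 0)
        (PySem.List.sorted (array.filter (fun x => PySem.Int.mod x 2 == 0)) (fun x => x) false)
        (evenIdx array 0) := by
    simp only [can_sort, foldA array 0 [] [] [] [], List.nil_append, hsPo, hsPe]
  set O := PySem.List.sorted (array.filter (fun x => PySem.Int.mod x 2 != 0)) (fun x => x) false with hOdef
  set E := PySem.List.sorted (array.filter (fun x => PySem.Int.mod x 2 == 0)) (fun x => x) false with hEdef
  set Po := oddIdx array 0 with hPodef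
  set Pe := evenIdx array 0 with hPedef
  have hlO : O.length = Po.length := by
    rw [hOdef, hPodef, PySem.List.length_sorted, length_oddIdx]
  have hlE : E.length = Pe.length := by
    rw [hEdef, hPedef, PySem.List.length_sorted, length_evenIdx]
  have hre : rebuild array O E = (mergePos (O.zip Po) (E.zip Pe)).map Prod.fst := by
    rw [hPodef, hPedef]
    exact rebuild_eq_mergePos array 0 O E (hPodef ▸ hlO) (hPedef ▸ hlE)
  have hB : can_sort_alt array = (rebuild array O E == PySem.List.sorted array (fun x => x) false) := by
    simp only [can_sort_alt, hOdef, hEdef]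
  -- hypotheses of the main lemma
  have hOp : O.Pairwise (· ≤ ·) := PySem.List.sorted_pairwise ..
  have hEp : E.Pairwise (· ≤ ·) := PySem.List.sorted_pairwise ..
  have hPop : Po.Pairwise (· < ·) := oddIdx_pairwise array 0
  have hPep : Pe.Pairwise (· < ·) := evenIdx_pairwise array 0
  have hdisj : ∀ p ∈ Po, ∀ q ∈ Pe, p ≠ q := fun p hp q hq heq =>
    idx_disjoint array 0 p hp (heq ▸ hq)
  have hval : ∀ a ∈ O, ∀ b ∈ E, a ≠ b := by
    intro a ha b hb heq
    rw [hOdef, PySem.List.mem_sorted] at ha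
    rw [hEdef, PySem.List.mem_sorted] at hb
    have h1 := (List.mem_filter.1 ha).2
    have h2 := (List.mem_filter.1 hb).2
    rw [heq] at h1
    simp only [bne_iff_ne, ne_eq] at h1
    exact h1 (by simpa using h2)
  have hloop := loop_iff_pairwise (O.length + E.length) O Po E Pe le_rfl
    hOp hEp hPop hPep hdisj hval hlO hlE
  -- the rebuilt list is a permutation of the input
  have hperm : ((mergePos (O.zip Po) (E.zip Pe)).map Prod.fst).Perm array := by
    have h1 := (mergePos_perm (O.zip Po) (E.zip Pe)).map Prod.fst
    rw [List.map_append, List.map_fst_zip hlO.le, List.map_fst_zip hlE.le] at h1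
    refine h1.trans ?_
    have h2 : O.Perm (array.filter (fun x => PySem.Int.mod x 2 != 0)) := PySem.List.sorted_perm ..
    have h3 : E.Perm (array.filter (fun x => PySem.Int.mod x 2 == 0)) := PySem.List.sorted_perm ..
    refine (h2.append h3).trans ?_
    have h4 : (fun x => !(PySem.Int.mod x 2 != 0)) = (fun x => PySem.Int.mod x 2 == 0) := by
      funext x; simp [bne]
    have h5 := List.filter_append_perm (fun x => PySem.Int.mod x 2 != 0) array
    rwa [h4] at h5
  -- B's comparison with sorted(array) says exactly that the rebuilt list is nondecreasing
  have hiff2 : (rebuild array O E == PySem.List.sorted array (fun x => x) false) = true ↔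
      ((mergePos (O.zip Po) (E.zip Pe)).map Prod.fst).Pairwise (· ≤ ·) := by
    rw [beq_iff_eq, hre]
    constructor
    · intro hEq; rw [hEq]; exact PySem.List.sorted_pairwise ..
    · intro hp
      exact (PySem.List.sorted_id_eq_of_perm_of_pairwise _ _ hperm hp).symm
  rw [hA, hB, Bool.eq_iff_iff]
  exact hloop.trans hiff2.symm
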